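-- pv_equiv track=rewrite | github.com/foreyes/ted-parallel-corpus-Chinese-English | src/main.py | process_en_lines
-- ===== SOURCE A (Python) =====
-- def process_en_lines(lines):
-- 	res, cur = [], ''
-- 	for line in lines:
-- 		if cur != '':
-- 			cur += ' '
-- 		cur += line
-- 		if line[-1] == '\"':
-- 			line = line[:-1]
-- 		if line[-1] in '.?!' or (line[0] == '(' and line[-1] == ')'):
-- 			# if cur != '(Applause)' and cur != '(Laughter)':
-- 			# 	res.append(cur)
-- 			res.append(cur)
-- 			cur = ''
-- 	if cur != '':# and cur != '(Applause)' and cur != '(Laughter)':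
-- 		res.append(cur)
-- 	return res
-- ===== SOURCE B (Python) =====
-- def process_en_lines(lines):
-- 	def is_end(line):
-- 		s = line[:-1] if line[-1] == '"' else line
-- 		return s[-1] in '.?!' or (line[0] == '(' and s[-1] == ')')
-- 	n = len(lines)
-- 	res, start = [], 0
-- 	while start < n:
-- 		k = start
-- 		while k < n and not is_end(lines[k]):
-- 			k += 1
-- 		if k < n:
-- 			res.append(' '.join(lines[start:k + 1]))
-- 			start = k + 1
-- 		else:
-- 			res.append(' '.join(lines[start:]))
-- 			start = n
-- 	return res
-- ===== Notes on version B (the rewrite author's own statement) =====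
-- stated objective: alternative
-- what changed: Replaces A's streaming fold with an incrementally concatenated string buffer by a two-pointer scheme: an inner scan advances an index to the next sentence-ending line, and each sentence is produced in one shot by slicing the input between boundary indices and joining; no accumulator string or buffer is carried.
import Mathlib
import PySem

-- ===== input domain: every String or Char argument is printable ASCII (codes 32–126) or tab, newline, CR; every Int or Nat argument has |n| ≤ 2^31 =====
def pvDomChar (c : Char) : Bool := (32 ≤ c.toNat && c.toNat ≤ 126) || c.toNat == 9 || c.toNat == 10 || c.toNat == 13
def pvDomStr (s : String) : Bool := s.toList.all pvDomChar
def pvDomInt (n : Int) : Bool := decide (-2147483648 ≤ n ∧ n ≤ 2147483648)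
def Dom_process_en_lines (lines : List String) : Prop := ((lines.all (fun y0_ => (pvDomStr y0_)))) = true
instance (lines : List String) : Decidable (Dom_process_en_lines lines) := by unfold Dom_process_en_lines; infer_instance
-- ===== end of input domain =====

-- B replaces A's streaming fold (string-concatenation buffer) by a two-pointer scan:
-- an inner index scan finds the next sentence-ending line, each sentence is a slice of the input joined once.

-- ===== PORT A =====
-- One fold over the lines carrying (res, cur); cur grows by string concatenation,
-- flushed when the (quote-stripped) line ends in .?! or is (...)-parenthesised.
-- Python's line[-1]/line[0] raise IndexError on '' / '"'; Pre_ excludes those, so .getD ' ' is never used.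
def process_en_lines (lines : List String) : List String :=
  let fin := lines.foldl (fun (st : List String × List Char) (line : String) =>
    let res := st.1
    let cur := if st.2 ≠ [] then st.2 ++ [' '] else st.2
    let cur := cur ++ line.toList
    let l := if (PySem.List.pyGet? line.toList (-1)).getD ' ' = '"' then
               PySem.List.slice line.toList none (some (-1)) else line.toList
    let c := (PySem.List.pyGet? l (-1)).getD ' '
    if c = '.' ∨ c = '?' ∨ c = '!' ∨
       ((PySem.List.pyGet? line.toList 0).getD ' ' = '(' ∧ c = ')') then
      (res ++ [String.ofList cur], [])
    else
      (res, cur)) ([], [])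
  if fin.2 ≠ [] then fin.1 ++ [String.ofList fin.2] else fin.1

-- ===== PORT B =====
-- B's helper is_end
def pvIsEnd (line : String) : Bool :=
  let s := if (PySem.List.pyGet? line.toList (-1)).getD ' ' = '"' then
             PySem.List.slice line.toList none (some (-1)) else line.toList
  let c := (PySem.List.pyGet? s (-1)).getD ' '
  (c == '.' || c == '?' || c == '!') ||
    (((PySem.List.pyGet? line.toList 0).getD ' ' == '(') && (c == ')'))

-- inner while loop: advance k while k < n and not is_end(lines[k])
def pvScan (lines : List String) (k : Nat) : Nat :=
  if h : k < lines.length then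
    if pvIsEnd lines[k] then k else pvScan lines (k + 1)
  else k
termination_by lines.length - k

-- the port's outer loop needs k ≥ start to terminate
theorem pvScan_ge (lines : List String) (k : Nat) : k ≤ pvScan lines k := by
  fun_induction pvScan with
  | case1 => omega
  | case2 k h hend ih => omega
  | case3 => omega

-- outer while loop over the start pointer; sentences are slices of the input
def pvOuter (lines : List String) (start : Nat) (res : List String) : List String :=
  if h : start < lines.length then
    let k := pvScan lines start
    if k < lines.length then
      pvOuter lines (k + 1)
        (res ++ [PySem.Str.join " " (PySem.List.slice lines (some (start : Int)) (some ((k : Int) + 1)))])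
    else
      res ++ [PySem.Str.join " " (PySem.List.slice lines (some (start : Int)) none)]
  else res
termination_by lines.length - start
decreasing_by
  have := pvScan_ge lines start
  omega

def process_en_lines_alt (lines : List String) : List String :=
  pvOuter lines 0 []

-- ===== PRECONDITION & SPEC =====
-- Pre_ excludes exactly the inputs where Python A raises IndexError:
-- a line '' (line[-1] fails) or a line '"' (the quote-stripped copy is empty, so its [-1] fails).
def Pre_process_en_lines (lines : List String) : Prop :=
  ∀ l ∈ lines, l ≠ "" ∧ l ≠ "\""
instance (lines : List String) : Decidable (Pre_process_en_lines lines) := by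
  unfold Pre_process_en_lines; infer_instance
def pvWitness_process_en_lines : List String := ["Hello", "world.", "(Applause)"]

def Spec_process_en_lines (lines : List String) (out : List String) : Prop := out = process_en_lines_alt lines
instance (lines : List String) (out : List String) : Decidable (Spec_process_en_lines lines out) := by unfold Spec_process_en_lines; infer_instance

-- ===== CLAIM (what is proved, stated in full; the proofs are below) =====
def Claim_equal_process_en_lines : Prop := ∀ (lines : List String), Dom_process_en_lines lines → Pre_process_en_lines lines → Spec_process_en_lines lines (process_en_lines lines)

-- ===== LEMMAS AND PROOFS =====

-- A's loop body as a named function (definitionally equal to the port's lambda)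
def pvStepA (st : List String × List Char) (line : String) : List String × List Char :=
  let cur := (if st.2 ≠ [] then st.2 ++ [' '] else st.2) ++ line.toList
  if (PySem.List.pyGet? (if (PySem.List.pyGet? line.toList (-1)).getD ' ' = '"' then
        PySem.List.slice line.toList none (some (-1)) else line.toList) (-1)).getD ' ' = '.' ∨
     (PySem.List.pyGet? (if (PySem.List.pyGet? line.toList (-1)).getD ' ' = '"' then
        PySem.List.slice line.toList none (some (-1)) else line.toList) (-1)).getD ' ' = '?' ∨
     (PySem.List.pyGet? (if (PySem.List.pyGet? line.toList (-1)).getD ' ' = '"' then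
        PySem.List.slice line.toList none (some (-1)) else line.toList) (-1)).getD ' ' = '!' ∨
     ((PySem.List.pyGet? line.toList 0).getD ' ' = '(' ∧
      (PySem.List.pyGet? (if (PySem.List.pyGet? line.toList (-1)).getD ' ' = '"' then
        PySem.List.slice line.toList none (some (-1)) else line.toList) (-1)).getD ' ' = ')') then
    (st.1 ++ [String.ofList cur], [])
  else
    (st.1, cur)

-- clean recursive specification both sides are reduced to:
-- split off the prefix up to the first sentence-ending line, recurse on the rest
def pvG (l : List String) : List String :=
  match h : List.findIdx? pvIsEnd l with
  | some j => PySem.Str.join " " (l.take (j + 1)) :: pvG (l.drop (j + 1))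
  | none => if l = [] then [] else [PySem.Str.join " " l]
termination_by l.length
decreasing_by
  have hne : l ≠ [] := by rintro rfl; simp at h
  have : 0 < l.length := List.length_pos_iff.mpr hne
  simp [List.length_drop]; omega

-- pvG with a pending buffer of already-scanned lines (bridge for the fold invariant)
def pvGBuf (buf l : List String) : List String :=
  match List.findIdx? pvIsEnd l with
  | some j => PySem.Str.join " " (buf ++ l.take (j + 1)) :: pvG (l.drop (j + 1))
  | none => if buf ++ l = [] then [] else [PySem.Str.join " " (buf ++ l)]

theorem pvGBuf_nil (l : List String) : pvGBuf [] l = pvG l := by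
  rw [pvG, pvGBuf]
  cases h : List.findIdx? pvIsEnd l <;> simp

theorem pvFlag_gen (c q : Char) :
    ((c == '.' || c == '?' || c == '!') || ((q == '(') && (c == ')'))) = true ↔
    (c = '.' ∨ c = '?' ∨ c = '!' ∨ (q = '(' ∧ c = ')')) := by
  simp [Bool.or_eq_true, Bool.and_eq_true, beq_iff_eq]
  tauto

theorem pvFlag_iff (line : String) :
    pvIsEnd line = true ↔
    ((PySem.List.pyGet? (if (PySem.List.pyGet? line.toList (-1)).getD ' ' = '"' then
        PySem.List.slice line.toList none (some (-1)) else line.toList) (-1)).getD ' ' = '.' ∨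
     (PySem.List.pyGet? (if (PySem.List.pyGet? line.toList (-1)).getD ' ' = '"' then
        PySem.List.slice line.toList none (some (-1)) else line.toList) (-1)).getD ' ' = '?' ∨
     (PySem.List.pyGet? (if (PySem.List.pyGet? line.toList (-1)).getD ' ' = '"' then
        PySem.List.slice line.toList none (some (-1)) else line.toList) (-1)).getD ' ' = '!' ∨
     ((PySem.List.pyGet? line.toList 0).getD ' ' = '(' ∧
      (PySem.List.pyGet? (if (PySem.List.pyGet? line.toList (-1)).getD ' ' = '"' then
        PySem.List.slice line.toList none (some (-1)) else line.toList) (-1)).getD ' ' = ')')) := by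
  simp only [pvIsEnd]
  exact pvFlag_gen _ _

theorem pvJoin_append (y : List Char) (xs : List (List Char)) (h : xs ≠ []) :
    PySem.Chars.join [' '] (xs ++ [y]) = PySem.Chars.join [' '] xs ++ ' ' :: y := by
  induction xs with
  | nil => simp at h
  | cons a rest ih =>
    cases rest with
    | nil => simp [PySem.Chars.join_singleton, PySem.Chars.join_cons_cons]
    | cons b r =>
      have h2 := ih (by simp)
      simp only [List.cons_append] at h2
      simp only [List.cons_append, PySem.Chars.join_cons_cons, h2, List.append_assoc]

theorem pvJoin_ne_nil (buf : List String) (hb : ∀ l ∈ buf, l ≠ "") (h : buf ≠ []) :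
    PySem.Chars.join [' '] (buf.map String.toList) ≠ [] := by
  cases buf with
  | nil => simp at h
  | cons a rest =>
    have ha : a.toList ≠ [] := fun hn => hb a (by simp) (String.toList_eq_nil_iff.mp hn)
    cases rest with
    | nil => simpa [PySem.Chars.join_singleton] using ha
    | cons b r =>
      simp only [List.map_cons, PySem.Chars.join_cons_cons]
      intro hc
      cases hx : a.toList <;> simp [hx] at hc ha

theorem pvJoin_toList (buf : List String) :
    (PySem.Str.join " " buf).toList = PySem.Chars.join [' '] (buf.map String.toList) := by
  rw [PySem.Str.toList_join]; rfl

-- stepping one un-ending line into the buffer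
theorem pvGBuf_step (buf : List String) (line : String) (rest : List String)
    (hf : pvIsEnd line = false) :
    pvGBuf buf (line :: rest) = pvGBuf (buf ++ [line]) rest := by
  unfold pvGBuf
  rw [List.findIdx?_cons, hf]
  cases h : List.findIdx? pvIsEnd rest <;> simp [List.append_assoc]

-- flushing the buffer at a sentence-ending line
theorem pvGBuf_flush (buf : List String) (line : String) (rest : List String)
    (hf : pvIsEnd line = true) :
    pvGBuf buf (line :: rest) = PySem.Str.join " " (buf ++ [line]) :: pvG rest := by
  unfold pvGBuf
  rw [List.findIdx?_cons, hf]
  simp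

-- the fold invariant: A's fold with buffer cur = joined buf computes res ++ pvGBuf buf l
theorem pvKeyA (l : List String) (res buf : List String) (cur : List Char)
    (hp : ∀ x ∈ l, x ≠ "" ∧ x ≠ "\"") (hb : ∀ x ∈ buf, x ≠ "")
    (hcur : cur = PySem.Chars.join [' '] (buf.map String.toList)) :
    (let fin := l.foldl pvStepA (res, cur);
     if fin.2 ≠ [] then fin.1 ++ [String.ofList fin.2] else fin.1)
    = res ++ pvGBuf buf l := by
  induction l generalizing res buf cur with
  | nil =>
    simp only [List.foldl_nil, pvGBuf, List.findIdx?_nil, List.append_nil]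
    by_cases hnb : buf = []
    · subst hnb
      simp [hcur, PySem.Chars.join_nil]
    · have hc : cur ≠ [] := hcur ▸ pvJoin_ne_nil buf hb hnb
      have hofs : String.ofList cur = PySem.Str.join " " buf := by
        rw [hcur, ← pvJoin_toList, String.ofList_toList]
      simp [hnb, hc, hofs]
  | cons line rest ih =>
    have hline : line ≠ "" := (hp line (by simp)).1
    have hp' : ∀ x ∈ rest, x ≠ "" ∧ x ≠ "\"" := fun x hx => hp x (by simp [hx])
    have hb' : ∀ x ∈ buf ++ [line], x ≠ "" := by
      intro x hx
      rcases List.mem_append.mp hx with h | h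
      · exact hb x h
      · simp at h; subst h; exact hline
    have hcur' : (if cur ≠ [] then cur ++ [' '] else cur) ++ line.toList
        = PySem.Chars.join [' '] ((buf ++ [line]).map String.toList) := by
      by_cases hnb : buf = []
      · subst hnb
        simp [hcur, PySem.Chars.join_nil, PySem.Chars.join_singleton]
      · have hc : cur ≠ [] := hcur ▸ pvJoin_ne_nil buf hb hnb
        rw [List.map_append, List.map_singleton,
          pvJoin_append line.toList (buf.map String.toList) (by simpa using hnb),
          ← hcur, if_pos hc, List.append_assoc, List.singleton_append]
    simp only [List.foldl_cons]
    by_cases hf : pvIsEnd line = true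
    · have hcond := (pvFlag_iff line).mp hf
      have hA : pvStepA (res, cur) line
          = (res ++ [String.ofList ((if cur ≠ [] then cur ++ [' '] else cur) ++ line.toList)], []) := by
        simp only [pvStepA, if_pos hcond]
      rw [hA, ih _ [] [] hp' (by simp) (by simp [PySem.Chars.join_nil])]
      have hj : String.ofList ((if cur ≠ [] then cur ++ [' '] else cur) ++ line.toList)
          = PySem.Str.join " " (buf ++ [line]) := by
        rw [hcur', ← pvJoin_toList, String.ofList_toList]
      rw [hj, pvGBuf_nil, pvGBuf_flush buf line rest hf]
      simp
    · have hf' : pvIsEnd line = false := by simp [hf]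
      have hcond := fun h => hf ((pvFlag_iff line).mpr h)
      have hA : pvStepA (res, cur) line
          = (res, (if cur ≠ [] then cur ++ [' '] else cur) ++ line.toList) := by
        simp only [pvStepA, if_neg hcond]
      rw [hA, ih _ _ _ hp' hb' hcur', pvGBuf_step buf line rest hf']

-- pvScan computes start + (index of first ending line in the dropped suffix), or the length
theorem pvScan_spec (lines : List String) (s : Nat) (hs : s ≤ lines.length) :
    pvScan lines s = (match List.findIdx? pvIsEnd (lines.drop s) with
      | some j => s + j
      | none => lines.length) := by
  rw [pvScan]
  split
  · next h =>
    have hd : lines.drop s = lines[s] :: lines.drop (s + 1) :=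
      List.drop_eq_getElem_cons h
    split
    · next hend => rw [hd, List.findIdx?_cons, hend]; simp
    · next hend =>
      have hend' : pvIsEnd lines[s] = false := by simp [hend]
      rw [pvScan_spec lines (s + 1) (by omega), hd, List.findIdx?_cons, hend']
      cases hj : List.findIdx? pvIsEnd (lines.drop (s + 1)) with
      | none => simp
      | some j => simp [Nat.add_comm, Nat.add_left_comm]
  · next h =>
    have hd : lines.drop s = [] := List.drop_eq_nil_of_le (by omega)
    rw [hd, List.findIdx?_nil]
    show s = lines.length
    omega
termination_by lines.length - s

-- the outer two-pointer loop computes res ++ pvG (suffix from start)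
theorem pvOuter_g (lines : List String) (start : Nat) (res : List String) :
    pvOuter lines start res = res ++ pvG (lines.drop start) := by
  fun_induction pvOuter with
  | case1 s res h k hk ih =>
    -- k = pvScan lines s < lines.length : found an ending line
    have hspec := pvScan_spec lines s (by omega)
    cases hj : List.findIdx? pvIsEnd (lines.drop s) with
    | none => simp only [hj] at hspec; omega
    | some j =>
      simp only [hj] at hspec
      have hk' : k = s + j := hspec
      have hjlt : j < (lines.drop s).length :=
        (List.findIdx?_eq_some_iff_getElem.mp hj).1
      rw [ih]
      have hslice : PySem.List.slice lines (some (s : Int)) (some ((k : Int) + 1))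
          = (lines.drop s).take (j + 1) := by
        have : ((k : Int) + 1) = ((k + 1 : Nat) : Int) := by push_cast; ring
        rw [this, PySem.List.slice_natCast]
        congr 1
        omega
      rw [hslice]
      have hdrop : lines.drop (k + 1) = (lines.drop s).drop (j + 1) := by
        rw [List.drop_drop]
        congr 1
        omega
      rw [hdrop]
      conv_rhs => rw [pvG]
      split
      · next j' hj' =>
        rw [hj] at hj'
        cases hj'
        simp
      · next hj' => rw [hj] at hj'; cases hj'
  | case2 s res h k hk =>
    -- pvScan returned lines.length : no ending line in the suffix
    have hspec := pvScan_spec lines s (by omega)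
    have hj : List.findIdx? pvIsEnd (lines.drop s) = none := by
      cases hj : List.findIdx? pvIsEnd (lines.drop s) with
      | none => rfl
      | some j =>
        exfalso
        simp only [hj] at hspec
        have hjlt : j < (lines.drop s).length :=
          (List.findIdx?_eq_some_iff_getElem.mp hj).1
        rw [List.length_drop] at hjlt
        have hk2 : ¬ (s + j) < lines.length := by rw [← hspec]; exact hk
        omega
    have hne : lines.drop s ≠ [] := by
      intro hnil
      have := congrArg List.length hnil
      simp [List.length_drop] at this
      omega
    rw [PySem.List.slice_from_natCast]
    conv_rhs => rw [pvG]
    split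
    · next j' hj' => rw [hj] at hj'; cases hj'
    · next => simp [hne]
  | case3 s res h =>
    have hd : lines.drop s = [] := List.drop_eq_nil_of_le (by omega)
    rw [hd, pvG]
    simp

-- ===== VERDICT (by name: the statement is the Claim_ definition above) =====
theorem process_en_lines_spec : Claim_equal_process_en_lines := by
  intro lines _ hpre
  show process_en_lines lines = process_en_lines_alt lines
  have hA : process_en_lines lines = pvG lines := by
    have h1 := pvKeyA lines [] [] [] hpre (by simp) (by simp [PySem.Chars.join_nil])
    rw [pvGBuf_nil] at h1
    exact h1
  have hB : process_en_lines_alt lines = pvG lines := by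
    unfold process_en_lines_alt
    rw [pvOuter_g]
    simp
  rw [hA, hB]
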